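-- pv_equiv track=rewrite | github.com/ShaneTWilliams/capstone | software/python/capstone/tools/drivers.py | __generate_diagram_labels
-- ===== SOURCE A (Python) =====
-- def __generate_diagram_labels(field_centers, fields_sorted):
--     labels = ""
--     for line in range(len(field_centers) + 1):
--         labels += "│   "
--         char = 0
--         while True:
--             if line != 0 and char == field_centers[len(field_centers) - line]:
--                 labels += "└"
--             elif line != 0 and char > field_centers[len(field_centers) - line]:
--                 labels += "─"
--             elif char in field_centers[: len(field_centers) - line]:
--                 labels += "│"
--             else:
--                 labels += " "
--             char += 1
--             if (
--                 line != 0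
--                 and char > (field_centers[-1] + 3)
--                 or line == 0
--                 and char > field_centers[-1]
--             ):
--                 break
--
--         if line > 0:
--             i = 0
--             for field_name, field_config in fields_sorted[::-1]:
--                 if field_name != "RESERVED":
--                     i += 1
--                 if i == line:
--                     labels += f"■ {field_name} ({field_config['access'].lower()})"
--                     break
--         labels += "\n"
--     return labels
-- ===== SOURCE B (Python) =====
-- def __generate_diagram_labels(field_centers, fields_sorted):
--     n = len(field_centers)
--
--     # Per-line labels: the k-th non-RESERVED field of reversed(fields_sorted)
--     # labels line k (at most one label per diagram line).
--     labels = []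
--     for name, config in reversed(fields_sorted):
--         if len(labels) == n:
--             break
--         if name != "RESERVED":
--             labels.append(f"■ {name} ({config['access'].lower()})")
--
--     # Multiset of the centers still to the left of the current corner.
--     counts = {}
--     for c in field_centers:
--         counts[c] = counts.get(c, 0) + 1
--
--     last = field_centers[-1]
--     # Every row spans at least column 0.
--     out = [
--         "│   "
--         + "".join("│" if k in counts else " " for k in range(max(last, 0) + 1))
--         + "\n"
--     ]
--
--     width = max(last + 3, 0) + 1
--     remaining = list(field_centers)
--     for line in range(1, n + 1):
--         target = remaining.pop()
--         counts[target] -= 1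
--         row = "".join(
--             "└" if k == target
--             else "─" if k > target
--             else "│" if counts.get(k, 0)
--             else " "
--             for k in range(width)
--         )
--         label = labels[line - 1] if line - 1 < len(labels) else ""
--         out.append("│   " + row + label + "\n")
--     return "".join(out)
-- ===== Notes on version B (the rewrite author's own statement) =====
-- stated objective: alternative
-- what changed: A scans every output column with a while loop that re-slices field_centers and linearly scans the slice per character, and re-scans fields_sorted[::-1] from scratch for every line; B precomputes the per-line labels once, builds a counter (multiset) of the centers once, and walks the lines popping one center and decrementing its count per line, so each cell is a dict lookup and the inner slice scans and label rescans disappear. Pre_ excludes only the inputs on which A raises: an empty field_centers list (IndexError) and a field matched to a line without an 'access' key (KeyError).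
import Mathlib
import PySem

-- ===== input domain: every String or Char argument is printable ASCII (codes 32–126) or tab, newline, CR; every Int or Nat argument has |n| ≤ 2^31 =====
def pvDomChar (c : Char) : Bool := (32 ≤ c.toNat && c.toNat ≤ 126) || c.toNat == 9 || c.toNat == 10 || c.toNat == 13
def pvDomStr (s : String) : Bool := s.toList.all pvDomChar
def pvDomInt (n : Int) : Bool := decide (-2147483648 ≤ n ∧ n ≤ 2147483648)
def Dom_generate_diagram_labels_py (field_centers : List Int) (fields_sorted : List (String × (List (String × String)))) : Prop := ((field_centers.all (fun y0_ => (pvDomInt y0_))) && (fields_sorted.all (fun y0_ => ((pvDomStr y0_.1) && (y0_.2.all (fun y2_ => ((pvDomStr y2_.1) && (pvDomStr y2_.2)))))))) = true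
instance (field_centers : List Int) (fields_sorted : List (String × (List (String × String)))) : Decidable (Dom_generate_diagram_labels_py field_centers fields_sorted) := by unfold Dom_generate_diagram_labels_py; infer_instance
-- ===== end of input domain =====

-- B replaces A's per-character slice scans and per-line rescans of fields_sorted[::-1] by a
-- counter of the centers maintained across lines (one pop + decrement per line) and a single
-- precomputed label list (objective: alternative decomposition, same output).

-- shared f-string "■ {name} ({config['access'].lower()})" (dict lookup = first match; Pre_ guarantees the key)
def pvLabelChars (name : String) (cfg : List (String × String)) : List Char :=
  ['■', ' '] ++ name.toList ++ [' ', '('] ++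
    PySem.Chars.lower ((List.lookup "access" cfg).getD "").toList ++ [')']

-- ===== PORT A =====
-- the inner `while True` loop of A; fuel = number of iterations = (bound).toNat + 1,
-- since the loop breaks after emitting chars 0..max(bound,0) (bound = fc[-1]+3 resp. fc[-1]).
-- `field_centers[len-line]` (only read when line ≠ 0, index then in range) is getD;
-- `field_centers[:len-line]` is take (slice with nonneg bound).
def pvLoopA (line : Nat) (fc : List Int) : Int → Nat → List Char
  | _, 0 => []
  | char, fuel+1 =>
      (if line ≠ 0 ∧ char = fc.getD (fc.length - line) 0 then '└'
       else if line ≠ 0 ∧ fc.getD (fc.length - line) 0 < char then '─'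
       else if char ∈ fc.take (fc.length - line) then '│'
       else ' ') :: pvLoopA line fc (char + 1) fuel

-- A's `for field_name, field_config in fields_sorted[::-1]` with counter i and break on i == line
def pvLabelScanA (line : Nat) : Nat → List (String × (List (String × String))) → List Char
  | _, [] => []
  | i, (name, cfg) :: rest =>
      let i' := if name ≠ "RESERVED" then i + 1 else i
      if i' = line then pvLabelChars name cfg
      else pvLabelScanA line i' rest

def generate_diagram_labels_py (field_centers : List Int) (fields_sorted : List (String × (List (String × String)))) : String :=
  let last := (PySem.List.pyGet? field_centers (-1)).getD 0   -- field_centers[-1]; Pre_ excludes []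
  String.ofList ((List.range (field_centers.length + 1)).foldl (fun labels line =>
    labels ++ ['│', ' ', ' ', ' '] ++
      pvLoopA line field_centers 0 ((if line ≠ 0 then last + 3 else last).toNat + 1) ++
      (if line > 0 then pvLabelScanA line 0 fields_sorted.reverse else []) ++ ['\n']) [])

-- ===== PORT B =====
-- B's label-precompute loop (break once n labels collected)
def pvLabelsGo (n : Nat) (acc : List (List Char)) : List (String × (List (String × String))) → List (List Char)
  | [] => acc
  | (name, cfg) :: rest =>
      if acc.length = n then acc
      else pvLabelsGo n (if name ≠ "RESERVED" then acc ++ [pvLabelChars name cfg] else acc) rest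

-- one row of B's generator expression (truthiness of counts.get(k, 0) = ≠ 0)
def pvRowB (counts : PySem.Dict Int Int) (target : Int) (width : Nat) : List Char :=
  (List.range width).map (fun (k : Nat) =>
    if ((k : Nat) : Int) = target then '└'
    else if target < ((k : Nat) : Int) then '─'
    else if counts.getD ((k : Nat) : Int) 0 ≠ 0 then '│'
    else ' ')

-- one iteration of B's `for line in range(1, n + 1)` over the state (remaining, counts, out):
-- remaining.pop(), counts[target] -= 1, out.append(...)
def pvStepB (labels : List (List Char)) (width : Nat)
    (st : List Int × PySem.Dict Int Int × List (List Char)) (line : Nat) :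
    List Int × PySem.Dict Int Int × List (List Char) :=
  let target := st.1.getLast?.getD 0      -- remaining.pop(); remaining is nonempty at every iteration
  let counts := st.2.1.insert target (st.2.1.getD target 0 - 1)
  (st.1.dropLast, counts,
    st.2.2 ++ [['│', ' ', ' ', ' '] ++ pvRowB counts target width ++
      ((labels[line - 1]?).getD []) ++ ['\n']])

def generate_diagram_labels_py_alt (field_centers : List Int) (fields_sorted : List (String × (List (String × String)))) : String :=
  let n := field_centers.length
  let labels := pvLabelsGo n [] fields_sorted.reverse
  let counts := field_centers.foldl (fun d c => d.insert c (d.getD c 0 + 1)) PySem.Dict.empty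
  let last := (PySem.List.pyGet? field_centers (-1)).getD 0   -- field_centers[-1]; Pre_ excludes []
  let row0 := ['│', ' ', ' ', ' '] ++
    (List.range (max last 0 + 1).toNat).map (fun (k : Nat) => if counts.contains ((k : Nat) : Int) then '│' else ' ') ++ ['\n']
  let width := (max (last + 3) 0 + 1).toNat
  String.ofList (((List.range' 1 n).foldl (pvStepB labels width) (field_centers, counts, [row0])).2.2.flatten)

-- ===== PRECONDITION & SPEC =====
def pvNonResRev (fields_sorted : List (String × (List (String × String)))) : List (String × (List (String × String))) :=
  fields_sorted.reverse.filter (fun p => p.1 ≠ "RESERVED")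

-- Pre_ excludes exactly the inputs on which the Python A raises: empty field_centers
-- (IndexError on field_centers[-1]) and inputs where a field actually matched to one of the
-- len(field_centers) lines lacks the 'access' key (KeyError).
def Pre_generate_diagram_labels_py (field_centers : List Int) (fields_sorted : List (String × (List (String × String)))) : Prop :=
  field_centers ≠ [] ∧
  ∀ k, k < min field_centers.length (pvNonResRev fields_sorted).length →
    (List.lookup "access" ((pvNonResRev fields_sorted).getD k ("", [])).2).isSome
instance (field_centers : List Int) (fields_sorted : List (String × (List (String × String)))) : Decidable (Pre_generate_diagram_labels_py field_centers fields_sorted) := by unfold Pre_generate_diagram_labels_py; infer_instance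

def pvWitness_generate_diagram_labels_py : List Int × (List (String × (List (String × String)))) :=
  ([0, 2], [("FLD", [("access", "RW")]), ("RESERVED", [])])

def Spec_generate_diagram_labels_py (field_centers : List Int) (fields_sorted : List (String × (List (String × String)))) (out : String) : Prop := out = generate_diagram_labels_py_alt field_centers fields_sorted
instance (field_centers : List Int) (fields_sorted : List (String × (List (String × String)))) (out : String) : Decidable (Spec_generate_diagram_labels_py field_centers fields_sorted out) := by unfold Spec_generate_diagram_labels_py; infer_instance

-- ===== CLAIM (what is proved, stated in full; the proofs are below) =====
def Claim_equal_generate_diagram_labels_py : Prop := ∀ (field_centers : List Int) (fields_sorted : List (String × (List (String × String)))), Dom_generate_diagram_labels_py field_centers fields_sorted → Pre_generate_diagram_labels_py field_centers fields_sorted → Spec_generate_diagram_labels_py field_centers fields_sorted (generate_diagram_labels_py field_centers fields_sorted)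

-- ===== LEMMAS AND PROOFS =====

-- the per-character value of A's inner loop
def pvCellA (line : Nat) (fc : List Int) (char : Int) : Char :=
  if line ≠ 0 ∧ char = fc.getD (fc.length - line) 0 then '└'
  else if line ≠ 0 ∧ fc.getD (fc.length - line) 0 < char then '─'
  else if char ∈ fc.take (fc.length - line) then '│'
  else ' '

theorem pvLoopA_model (line : Nat) (fc : List Int) :
    ∀ (fuel : Nat) (char : Int),
      pvLoopA line fc char fuel = (List.range fuel).map (fun (k : Nat) => pvCellA line fc (char + (k : Int))) := by
  intro fuel
  induction fuel with
  | zero => intro char; simp [pvLoopA]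
  | succ f ih =>
      intro char
      rw [List.range_succ_eq_map, List.map_cons, List.map_map]
      simp only [pvLoopA]
      refine congrArg₂ _ (by simp [pvCellA]) ?_
      rw [ih (char + 1)]
      refine List.map_congr_left (fun k _ => ?_)
      show pvCellA line fc (char + 1 + (k : Int)) = pvCellA line fc (char + ((k + 1 : Nat) : Int))
      congr 1
      push_cast
      ring

def pvLabOf (p : String × (List (String × String))) : Option (List Char) :=
  if p.1 ≠ "RESERVED" then some (pvLabelChars p.1 p.2) else none

theorem pvLabelScanA_model (line : Nat) :
    ∀ (L : List (String × (List (String × String)))) (i : Nat), i < line →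
      pvLabelScanA line i L = ((L.filterMap pvLabOf)[line - 1 - i]?).getD [] := by
  intro L
  induction L with
  | nil => intro i _; simp [pvLabelScanA]
  | cons p rest ih =>
      intro i hi
      obtain ⟨name, cfg⟩ := p
      by_cases hres : name ≠ "RESERVED"
      · simp only [pvLabelScanA, if_pos hres]
        have hfm : (List.filterMap pvLabOf ((name, cfg) :: rest)) =
            pvLabelChars name cfg :: List.filterMap pvLabOf rest := by
          simp [pvLabOf, hres]
        by_cases heq : i + 1 = line
        · simp only [if_pos heq, hfm]
          have : line - 1 - i = 0 := by omega
          simp [this]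
        · simp only [if_neg heq, hfm]
          have hi' : i + 1 < line := by omega
          rw [ih _ hi']
          have : line - 1 - i = (line - 1 - (i + 1)) + 1 := by omega
          simp [this]
      · simp only [pvLabelScanA, if_neg hres]
        have hfm : (List.filterMap pvLabOf ((name, cfg) :: rest)) = List.filterMap pvLabOf rest := by
          simp [pvLabOf, hres]
        have hne : ¬ (i = line) := by omega
        simp only [if_neg hne, hfm]
        exact ih _ hi

theorem pvLabelsGo_model (n : Nat) :
    ∀ (L : List (String × (List (String × String)))) (acc : List (List Char)), acc.length ≤ n →
      pvLabelsGo n acc L = acc ++ (L.filterMap pvLabOf).take (n - acc.length) := by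
  intro L
  induction L with
  | nil => intro acc _; simp [pvLabelsGo]
  | cons p rest ih =>
      intro acc hle
      obtain ⟨name, cfg⟩ := p
      by_cases hn : acc.length = n
      · simp [pvLabelsGo, hn, List.filterMap_cons]
      · have hlt : acc.length < n := lt_of_le_of_ne hle hn
        by_cases hres : name ≠ "RESERVED"
        · simp only [pvLabelsGo, if_neg hn, if_pos hres]
          rw [ih _ (by simp; omega)]
          have : (List.filterMap pvLabOf ((name, cfg) :: rest)) =
              pvLabelChars name cfg :: List.filterMap pvLabOf rest := by
            simp [pvLabOf, hres]
          rw [this]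
          have hstep : n - acc.length = (n - (acc ++ [pvLabelChars name cfg]).length) + 1 := by
            simp; omega
          rw [hstep, List.take_succ_cons]
          simp
        · simp only [pvLabelsGo, if_neg hn, if_neg hres]
          rw [ih _ hle]
          have : (List.filterMap pvLabOf ((name, cfg) :: rest)) = List.filterMap pvLabOf rest := by
            simp [pvLabOf, hres]
          rw [this]

theorem pvFoldl_flatten4 {α : Type} (h1 h2 h3 h4 : α → List Char) :
    ∀ (l : List α) (init : List Char),
      l.foldl (fun acc x => acc ++ h1 x ++ h2 x ++ h3 x ++ h4 x) init
        = init ++ (l.map (fun x => h1 x ++ h2 x ++ h3 x ++ h4 x)).flatten := by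
  intro l
  induction l with
  | nil => intro init; simp
  | cons x xs ih => intro init; rw [List.foldl_cons, ih]; simp

-- the value of B's row cell, expressed over the input (counts at line = counter of the prefix)
def pvCellB (fc : List Int) (line : Nat) (k : Nat) : Char :=
  if (k : Int) = fc.getD (fc.length - line) 0 then '└'
  else if fc.getD (fc.length - line) 0 < (k : Int) then '─'
  else if ((fc.take (fc.length - line)).count (k : Int) : Int) ≠ 0 then '│'
  else ' '

-- invariant of B's line loop: after m iterations, remaining = the untreated prefix,
-- counts = a dict counting that prefix, out = the first m rows appended in order
theorem pvLoopB_inv (fc : List Int) (labels : List (List Char)) (width : Nat)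
    (out0 : List (List Char)) :
    ∀ m, m ≤ fc.length →
      ∃ d : PySem.Dict Int Int,
        (List.range' 1 m).foldl (pvStepB labels width) (fc, PySem.Dict.counter fc, out0) =
          (fc.take (fc.length - m), d,
            out0 ++ (List.range' 1 m).map (fun line =>
              ['│', ' ', ' ', ' '] ++ (List.range width).map (pvCellB fc line) ++
                ((labels[line - 1]?).getD []) ++ ['\n'])) ∧
        ∀ x : Int, d.getD x 0 = ((fc.take (fc.length - m)).count x : Int) := by
  intro m
  induction m with
  | zero =>
      intro _
      refine ⟨PySem.Dict.counter fc, ?_, ?_⟩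
      · simp
      · intro x
        rw [PySem.Dict.getD_counter]
        simp
  | succ m ih =>
      intro hm
      obtain ⟨d, heq, hd⟩ := ih (by omega)
      have hconcat : List.range' 1 (m + 1) = List.range' 1 m ++ [1 + m] := by
        simp [List.range'_concat]
      set j := fc.length - (m + 1) with hj
      have hjlt : j < fc.length := by omega
      have hjm : fc.length - m = j + 1 := by omega
      -- target = remaining.pop() = fc[j]
      have htgt : (fc.take (fc.length - m)).getLast?.getD 0 = fc.getD j 0 := by
        rw [List.getLast?_eq_getElem?, List.length_take]
        have : min (fc.length - m) fc.length - 1 = j := by omega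
        rw [this, List.getElem?_take_of_lt (by omega), List.getD_eq_getElem?_getD]
      -- remaining.pop() leaves the shorter prefix
      have hdrop : (fc.take (fc.length - m)).dropLast = fc.take j := by
        rw [List.dropLast_eq_take, List.length_take, List.take_take]
        congr 1
        omega
      -- the treated prefix splits off its last element fc[j]
      have hsplit : fc.take (fc.length - m) = fc.take j ++ [fc.getD j 0] := by
        rw [hjm, List.take_add_one, List.getElem?_eq_getElem hjlt]
        simp [List.getD_eq_getElem?_getD, List.getElem?_eq_getElem hjlt]
      have hd' : ∀ x : Int,
          (d.insert (fc.getD j 0) (d.getD (fc.getD j 0) 0 - 1)).getD x 0 =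
            ((fc.take j).count x : Int) := by
        intro x
        rw [PySem.Dict.getD_insert]
        by_cases hx : x = fc.getD j 0
        · rw [if_pos hx, hd, hsplit, hx]
          simp [List.count_append]
        · rw [if_neg hx, hd, hsplit, List.count_append]
          have : (List.count x [fc.getD j 0]) = 0 := by
            simp only [List.count_singleton]
            simp [beq_iff_eq]
            exact fun h => hx h.symm
          omega
      refine ⟨d.insert (fc.getD j 0) (d.getD (fc.getD j 0) 0 - 1), ?_, hd'⟩
      have hrow : pvRowB (d.insert (fc.getD j 0) (d.getD (fc.getD j 0) 0 - 1)) (fc.getD j 0)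
          width = (List.range width).map (pvCellB fc (1 + m)) := by
        rw [pvRowB]
        apply List.map_congr_left
        intro k _
        rw [pvCellB, show fc.length - (1 + m) = j by omega, hd']
      rw [hconcat, List.foldl_append, heq, List.foldl_cons, List.foldl_nil]
      simp only [pvStepB, htgt, hdrop, hrow]
      rw [List.map_append]
      simp

-- ===== VERDICT (by name: the statement is the Claim_ definition above) =====
theorem generate_diagram_labels_py_spec : Claim_equal_generate_diagram_labels_py := by
  intro fc fs _ hpre
  obtain ⟨hne, -⟩ := hpre
  unfold Spec_generate_diagram_labels_py
  simp only [generate_diagram_labels_py, generate_diagram_labels_py_alt]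
  rw [PySem.Dict.foldl_insert_getD_add_one_eq_counter]
  set last := (PySem.List.pyGet? fc (-1)).getD 0 with hlast
  congr 1
  rw [pvFoldl_flatten4, List.nil_append]
  obtain ⟨d, heq, -⟩ := pvLoopB_inv fc (pvLabelsGo fc.length [] fs.reverse)
    ((max (last + 3) 0 + 1).toNat) _ fc.length (le_refl _)
  rw [heq]
  rw [List.range_eq_range', List.range'_succ, List.map_cons, List.flatten_cons,
      List.singleton_append, List.flatten_cons, Nat.zero_add]
  congr 1
  · -- line 0
    simp only [if_neg (by omega : ¬ (0 : Nat) > 0), if_neg (by simp : ¬ (0 : Nat) ≠ 0)]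
    rw [pvLoopA_model, show (max last 0 + 1).toNat = last.toNat + 1 by omega]
    simp only [List.append_nil, List.cons_append, List.nil_append]
    refine congrArg _ (congrArg _ (congrArg _ (congrArg _ (congrArg₂ _ ?_ rfl))))
    apply List.map_congr_left
    intro k _
    rw [pvCellA]
    simp only [ne_eq, not_true_eq_false, false_and, if_false, Nat.sub_zero,
      List.take_length, zero_add]
    rw [PySem.Dict.contains_counter]
    by_cases hk : (k : Int) ∈ fc
    · rw [if_pos hk, if_pos (by simpa using hk)]
    · rw [if_neg hk, if_neg (by simpa using hk)]
  · -- lines 1..n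
    congr 1
    apply List.map_congr_left
    intro line hline
    have hmem : 1 ≤ line ∧ line < 1 + fc.length := by
      have := List.mem_range'_1.mp hline
      omega
    rw [if_pos (by omega : line > 0), if_pos (by omega : line ≠ 0)]
    rw [pvLoopA_model, show ((last + 3).toNat + 1) = (max (last + 3) 0 + 1).toNat by omega]
    simp only [List.append_assoc, List.cons_append, List.nil_append]
    refine congrArg _ (congrArg _ (congrArg _ (congrArg _ (congrArg₂ _ ?_ (congrArg₂ _ ?_ rfl)))))
    · -- the diagram cells
      apply List.map_congr_left
      intro k _
      rw [pvCellA, pvCellB]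
      simp only [zero_add]
      have h1 : (line ≠ 0 ∧ (k : Int) = fc.getD (fc.length - line) 0) ↔
          ((k : Int) = fc.getD (fc.length - line) 0) := by
        constructor
        · exact fun h => h.2
        · exact fun h => ⟨by omega, h⟩
      have h2 : (line ≠ 0 ∧ fc.getD (fc.length - line) 0 < (k : Int)) ↔
          (fc.getD (fc.length - line) 0 < (k : Int)) := by
        constructor
        · exact fun h => h.2
        · exact fun h => ⟨by omega, h⟩
      rw [if_congr h1 rfl (if_congr h2 rfl rfl)]
      have h3 : ((k : Int) ∈ fc.take (fc.length - line)) ↔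
          (((fc.take (fc.length - line)).count (k : Int) : Int) ≠ 0) := by
        rw [← List.count_pos_iff]
        omega
      rw [if_congr h3 rfl rfl]
    · -- the label part
      rw [pvLabelScanA_model line fs.reverse 0 (by omega),
          pvLabelsGo_model fc.length fs.reverse [] (by simp), List.nil_append,
          List.length_nil, Nat.sub_zero, Nat.sub_zero,
          List.getElem?_take_of_lt (by omega : line - 1 < fc.length)]
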